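-- pv_equiv track=rewrite | github.com/Karimchmtz/leetcode | src/countPrefixes.py | countPrefixes
-- ===== SOURCE A (Python) =====
-- def countPrefixes(words: list, s: str) -> int:
--     def isPrefix(prefix: str, word: str) -> bool:
--         i = 0
--         for letter in prefix:
--             if i == len(word):
--                 return False
--             if letter != word[i]:
--                 return False
--             i += 1
--         return True
--     count = 0
--
--     for pre in words:
--         if isPrefix(pre, s):
--             count += 1
--
--     return count
-- ===== SOURCE B (Python) =====
-- def countPrefixes(words: list, s: str) -> int:
--     return sum(s[:len(w)] == w for w in words)
-- ===== Notes on version B (the rewrite author's own statement) =====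
-- stated objective: idiomatic
-- what changed: Replaces the hand-rolled per-character scan with running index and early returns by a one-line sum of slice comparisons s[:len(w)] == w over the words.
import Mathlib
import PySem

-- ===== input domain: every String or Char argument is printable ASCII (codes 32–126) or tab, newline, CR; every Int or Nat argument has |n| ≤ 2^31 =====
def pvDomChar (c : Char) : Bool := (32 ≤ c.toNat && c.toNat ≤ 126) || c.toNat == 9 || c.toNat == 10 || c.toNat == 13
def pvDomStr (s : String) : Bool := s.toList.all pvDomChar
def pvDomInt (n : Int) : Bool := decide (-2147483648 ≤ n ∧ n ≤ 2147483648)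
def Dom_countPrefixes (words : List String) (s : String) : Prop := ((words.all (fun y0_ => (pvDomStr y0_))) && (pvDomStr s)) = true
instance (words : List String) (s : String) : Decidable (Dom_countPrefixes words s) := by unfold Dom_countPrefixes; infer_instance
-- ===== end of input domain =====

-- B counts words by the slice comparison s[:len(w)] == w instead of A's hand-rolled per-character scan with a running index; idiomatic decomposition, return value proved equal.

-- ===== PORT A =====
-- helper isPrefix: 'for letter in prefix' with running index i into word
def pvIsPrefixA : List Char → List Char → Nat → Bool
  | [], _, _ => true
  | letter :: rest, w, i =>
    if i = w.length then false
    else if some letter ≠ PySem.List.pyGet? w (i : Int) then false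
    else pvIsPrefixA rest w (i + 1)

def countPrefixes (words : List String) (s : String) : Int :=
  words.foldl (fun count pre => if pvIsPrefixA pre.toList s.toList 0 then count + 1 else count) 0

-- ===== PORT B =====
def countPrefixes_alt (words : List String) (s : String) : Int :=
  words.foldl (fun acc w =>
    acc + (if PySem.Str.slice s none (some (PySem.Str.len w)) = w then 1 else 0)) 0

-- ===== PRECONDITION & SPEC =====
def Spec_countPrefixes (words : List String) (s : String) (out : Int) : Prop := out = countPrefixes_alt words s
instance (words : List String) (s : String) (out : Int) : Decidable (Spec_countPrefixes words s out) := by unfold Spec_countPrefixes; infer_instance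

-- ===== CLAIM (what is proved, stated in full; the proofs are below) =====
def Claim_equal_countPrefixes : Prop := ∀ (words : List String) (s : String), Dom_countPrefixes words s → Spec_countPrefixes words s (countPrefixes words s)

-- ===== LEMMAS AND PROOFS =====

-- A's scan decides the prefix relation on the remaining suffix
theorem pvIsPrefixA_iff (pre : List Char) : ∀ (w : List Char) (i : Nat), i ≤ w.length →
    (pvIsPrefixA pre w i = true ↔ pre <+: w.drop i) := by
  induction pre with
  | nil => intro w i _; simp [pvIsPrefixA]
  | cons letter rest ih =>
    intro w i hi
    by_cases h : i = w.length
    · subst h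
      simp [pvIsPrefixA, List.drop_length]
    · have hlt : i < w.length := lt_of_le_of_ne hi h
      have hget : PySem.List.pyGet? w (i : Int) = some w[i] := by
        simp [hlt]
      have hdrop : w.drop i = w[i] :: w.drop (i + 1) := List.drop_eq_getElem_cons hlt
      rw [pvIsPrefixA, if_neg h, hget, hdrop]
      by_cases hc : letter = w[i]
      · rw [List.cons_prefix_cons]
        simp [hc, ih w (i + 1) hlt]
      · rw [List.cons_prefix_cons]
        simp [hc]

-- B's slice comparison decides the prefix relation
theorem slice_eq_iff (s w : String) :
    (PySem.Str.slice s none (some (PySem.Str.len w)) = w) ↔ w.toList <+: s.toList := by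
  have htl : (PySem.Str.slice s none (some (PySem.Str.len w))).toList
      = s.toList.take w.toList.length := by
    simp [PySem.Str.toList_slice]
  constructor
  · intro h
    have : s.toList.take w.toList.length = w.toList := by rw [← htl, h]
    rw [List.prefix_iff_eq_take]
    exact this.symm
  · intro hp
    apply String.toList_injective
    rw [htl]
    exact (List.prefix_iff_eq_take.mp hp).symm

theorem pvStep_eq (c : Bool) (acc : Int) :
    (if c = true then acc + 1 else acc) = acc + (if c = true then 1 else 0) := by
  cases c <;> simp

theorem fold_eq (s : String) (words : List String) : ∀ (acc : Int),
    words.foldl (fun count pre => if pvIsPrefixA pre.toList s.toList 0 then count + 1 else count) acc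
  = words.foldl (fun acc w =>
      acc + (if PySem.Str.slice s none (some (PySem.Str.len w)) = w then 1 else 0)) acc := by
  induction words with
  | nil => intro acc; rfl
  | cons w ws ih =>
    intro acc
    rw [List.foldl_cons, List.foldl_cons]
    have hcond : pvIsPrefixA w.toList s.toList 0
        = decide (PySem.Str.slice s none (some (PySem.Str.len w)) = w) := by
      have h1 := pvIsPrefixA_iff w.toList s.toList 0 (Nat.zero_le _)
      rw [List.drop_zero] at h1
      rw [Bool.eq_iff_iff, h1, decide_eq_true_iff, slice_eq_iff]
    rw [show (if pvIsPrefixA w.toList s.toList 0 = true then acc + 1 else acc)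
          = acc + (if pvIsPrefixA w.toList s.toList 0 = true then 1 else 0) from
        pvStep_eq _ acc, hcond, ih]
    simp

-- ===== VERDICT (by name: the statement is the Claim_ definition above) =====
theorem countPrefixes_spec : Claim_equal_countPrefixes := by
  intro words s _
  unfold Spec_countPrefixes countPrefixes countPrefixes_alt
  exact fold_eq s words 0
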